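-- pv_equiv track=rewrite | github.com/JamesDev51/algorithm | 자료구조 (Data structure)/스택 (Stack)/boj_3986.py | solve
-- ===== SOURCE A (Python) =====
-- def solve(word):
--     stack=[]
--     for s in word:
--         if not stack: stack.append(s)
--         else:
--             if stack[-1]==s:stack.pop()
--             else:stack.append(s)
--     return True if not stack else False
-- ===== SOURCE B (Python) =====
-- def _find_pair(w):
--     # left-to-right scan for the first adjacent equal pair; returns (prefix, rest) or None
--     for i in range(len(w) - 1):
--         if w[i] == w[i + 1]:
--             return w[:i], w[i + 2:]
--     return None
--
--
-- def solve(word):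
--     w = word
--     while True:
--         f = _find_pair(w)
--         if f is None:
--             return w == ""
--         p, r = f
--         w = p + r
-- ===== Notes on version B (the rewrite author's own statement) =====
-- stated objective: alternative
-- what changed: Replaced the single stack pass with repeated find-first-adjacent-equal-pair scans that delete the pair and restart until the word is irreducible (correct by confluence of the xx->epsilon rewrite).
import Mathlib
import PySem

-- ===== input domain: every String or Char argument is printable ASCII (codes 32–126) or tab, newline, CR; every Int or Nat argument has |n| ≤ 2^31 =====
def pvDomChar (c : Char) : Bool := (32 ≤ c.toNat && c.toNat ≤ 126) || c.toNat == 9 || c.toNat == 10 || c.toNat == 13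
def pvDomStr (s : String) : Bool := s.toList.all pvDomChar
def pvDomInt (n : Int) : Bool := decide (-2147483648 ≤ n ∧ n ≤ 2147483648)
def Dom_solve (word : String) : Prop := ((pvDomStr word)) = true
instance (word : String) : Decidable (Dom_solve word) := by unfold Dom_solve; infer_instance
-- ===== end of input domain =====

-- B replaces A's single stack pass by repeated find-first-adjacent-pair-and-delete scans
-- (an alternative algorithm, same return value; no speed claim).

-- ===== PORT A =====
-- Python list used as a stack, modelled head-first: append = cons, stack[-1] = head!, pop = tail.
def pvStep (stack : List Char) (s : Char) : List Char :=
  if stack = [] then [s]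
  else if stack.head! = s then stack.tail
  else s :: stack

def solve (word : String) : Bool :=
  (word.toList.foldl pvStep []).isEmpty

-- ===== PORT B =====
-- _find_pair: scan left to right for the first i with w[i] = w[i+1]; return (w[:i], w[i+2:]).
def pvFindPair : List Char → Option (List Char × List Char)
  | a :: b :: rest =>
      if a = b then some ([], rest)
      else match pvFindPair (b :: rest) with
        | none => none
        | some (p, r) => some (a :: p, r)
  | _ => none

theorem pvFindPair_shrinks : ∀ (w p r : List Char),
    pvFindPair w = some (p, r) → (p ++ r).length < w.length := by
  intro w
  induction w with
  | nil => intro p r h; simp [pvFindPair] at h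
  | cons a t ih =>
    intro p r h
    match t, h with
    | b :: rest, h =>
      by_cases hab : a = b
      · simp [pvFindPair, hab] at h
        simp [h.1, ← h.2]
      · simp only [pvFindPair, if_neg hab] at h
        cases hfp : pvFindPair (b :: rest) with
        | none => rw [hfp] at h; simp at h
        | some pr =>
          rw [hfp] at h
          simp at h
          obtain ⟨h1, h2⟩ := h
          have := ih pr.1 pr.2 (by rw [hfp])
          simp [← h1, ← h2] at *
          omega

-- the while loop of B: delete the first adjacent pair and restart, until none remains
def pvLoop (w : List Char) : Bool :=
  match h : pvFindPair w with
  | none => w.isEmpty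
  | some (p, r) => pvLoop (p ++ r)
termination_by w.length
decreasing_by exact pvFindPair_shrinks w p r h

def solve_alt (word : String) : Bool := pvLoop word.toList

-- ===== PRECONDITION & SPEC =====
def Spec_solve (word : String) (out : Bool) : Prop := out = solve_alt word
instance (word : String) (out : Bool) : Decidable (Spec_solve word out) := by unfold Spec_solve; infer_instance

-- ===== CLAIM (what is proved, stated in full; the proofs are below) =====
def Claim_equal_solve : Prop := ∀ (word : String), Dom_solve word → Spec_solve word (solve word)

-- ===== LEMMAS AND PROOFS =====

-- unfolding equations for pvLoop
theorem pvLoop_none (w : List Char) (h : pvFindPair w = none) : pvLoop w = w.isEmpty := by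
  rw [pvLoop]
  split <;> simp_all

theorem pvLoop_some (w p r : List Char) (h : pvFindPair w = some (p, r)) :
    pvLoop w = pvLoop (p ++ r) := by
  rw [pvLoop]
  split <;> simp_all

-- the stack built by A never holds two equal adjacent elements
theorem pvStep_chain (st : List Char) (c : Char) (h : st.IsChain (· ≠ ·)) :
    (pvStep st c).IsChain (· ≠ ·) := by
  unfold pvStep
  split
  · simp
  · split
    · exact h.tail
    · rename_i hne hhd
      cases st with
      | nil => simp at hne
      | cons d rest =>
        simp at hhd
        exact List.isChain_cons_cons.mpr ⟨fun hc => hhd hc.symm, h⟩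

-- pushing the same char twice onto a duplicate-free stack is the identity
theorem pvStep_pvStep (st : List Char) (c : Char) (h : st.IsChain (· ≠ ·)) :
    pvStep (pvStep st c) c = st := by
  cases st with
  | nil => simp [pvStep]
  | cons d rest =>
    by_cases hdc : d = c
    · subst hdc
      cases rest with
      | nil => simp [pvStep]
      | cons e rest' =>
        have hde : d ≠ e := (List.isChain_cons_cons.mp h).1
        simp [pvStep, Ne.symm hde]
    · simp [pvStep, hdc]

-- deleting an adjacent equal pair anywhere does not change A's fold (from a duplicate-free stack)
theorem pvRun_pair (xs : List Char) : ∀ (st : List Char), st.IsChain (· ≠ ·) →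
    ∀ (c : Char) (ys : List Char),
    List.foldl pvStep st (xs ++ c :: c :: ys) = List.foldl pvStep st (xs ++ ys) := by
  induction xs with
  | nil =>
    intro st h c ys
    simp [List.foldl, pvStep_pvStep st c h]
  | cons x xs ih =>
    intro st h c ys
    simp only [List.cons_append, List.foldl]
    exact ih (pvStep st x) (pvStep_chain st x h) c ys

-- on a word with no adjacent equal pair A's fold only pushes
theorem pvRun_noadj : ∀ (xs st : List Char), (st.reverse ++ xs).IsChain (· ≠ ·) →
    List.foldl pvStep st xs = xs.reverse ++ st := by
  intro xs
  induction xs with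
  | nil => intro st _; simp
  | cons c t ih =>
    intro st h
    have hstep : pvStep st c = c :: st := by
      cases st with
      | nil => simp [pvStep]
      | cons d rest =>
        have hdc : d ≠ c := by
          have h' : (rest.reverse ++ d :: c :: t).IsChain (· ≠ ·) := by
            simpa using h
          exact (List.isChain_append_cons_cons.mp h').2.1
        simp [pvStep, hdc]
    rw [List.foldl_cons, hstep, ih (c :: st) (by simpa using h)]
    simp

-- if the scan finds no pair, the word has no adjacent equal pair
theorem pvFindPair_none : ∀ (w : List Char), pvFindPair w = none → w.IsChain (· ≠ ·) := by
  intro w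
  induction w with
  | nil => intro _; simp
  | cons a t ih =>
    intro h
    cases t with
    | nil => simp
    | cons b rest =>
      by_cases hab : a = b
      · simp [pvFindPair, hab] at h
      · simp only [pvFindPair, if_neg hab] at h
        cases hfp : pvFindPair (b :: rest) with
        | none => exact List.isChain_cons_cons.mpr ⟨hab, ih hfp⟩
        | some pr => rw [hfp] at h; simp at h

-- if the scan finds a pair, the word splits around it
theorem pvFindPair_some : ∀ (w p r : List Char),
    pvFindPair w = some (p, r) → ∃ c, w = p ++ c :: c :: r := by
  intro w
  induction w with
  | nil => intro p r h; simp [pvFindPair] at h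
  | cons a t ih =>
    intro p r h
    match t, h with
    | b :: rest, h =>
      by_cases hab : a = b
      · simp [pvFindPair, hab] at h
        exact ⟨a, by simp [← h.1, ← h.2, hab]⟩
      · simp only [pvFindPair, if_neg hab] at h
        cases hfp : pvFindPair (b :: rest) with
        | none => rw [hfp] at h; simp at h
        | some pr =>
          rw [hfp] at h
          simp at h
          obtain ⟨c, hc⟩ := ih pr.1 pr.2 (by rw [hfp])
          exact ⟨c, by simp [← h.1, ← h.2, hc]⟩

-- B's loop computes exactly the emptiness of A's final stack
theorem pvLoop_eq : ∀ (w : List Char), pvLoop w = (List.foldl pvStep [] w).isEmpty := by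
  intro w
  induction w using pvLoop.induct with
  | case1 w h =>
    rw [pvLoop_none w h]
    rw [pvRun_noadj w [] (by simpa using pvFindPair_none w h)]
    simp
  | case2 w p r h ih =>
    rw [pvLoop_some w p r h]
    obtain ⟨c, hc⟩ := pvFindPair_some w p r h
    rw [ih, hc, pvRun_pair p [] (by simp) c r]

-- ===== VERDICT (by name: the statement is the Claim_ definition above) =====
theorem solve_spec : Claim_equal_solve := by
  intro word _
  unfold Spec_solve solve solve_alt
  exact (pvLoop_eq word.toList).symm
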